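-- pv_equiv track=rewrite | github.com/sholt94/congress-ai | etl_billstatus.py | _dedupe_cosponsors
-- ===== SOURCE A (Python) =====
-- def _dedupe_cosponsors(rows):
--     merged = {}
--     for (c,t,n,bio,fulln,party,state,joined,is_orig) in rows:
--         key = (c,t,n,bio)
--         if key not in merged:
--             merged[key] = [c,t,n,bio,fulln,party,state,joined,is_orig]
--         else:
--             cur = merged[key]
--             cur[4] = fulln if fulln else cur[4]
--             cur[5] = party if party else cur[5]
--             cur[6] = state if state else cur[6]
--             cur[7] = joined if joined else cur[7]
--             cur[8] = True if (is_orig is True or cur[8] is True) else (is_orig if is_orig is not None else cur[8])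
--     return [tuple(v) for v in merged.values()]
-- ===== SOURCE B (Python) =====
-- def _merge(cur, row):
--     c, t, n, bio, f, p, s, j, o = cur
--     _, _, _, _, f2, p2, s2, j2, o2 = row
--     return (c, t, n, bio,
--             f2 if f2 else f,
--             p2 if p2 else p,
--             s2 if s2 else s,
--             j2 if j2 else j,
--             True if (o2 is True or o is True) else (o2 if o2 is not None else o))
--
-- def _dedupe_cosponsors(rows):
--     groups = {}
--     for row in rows:
--         groups.setdefault((row[0], row[1], row[2], row[3]), []).append(row)
--     out = []
--     for members in groups.values():
--         cur = members[0]
--         for row in members[1:]: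
--             cur = _merge(cur, row)
--         out.append(cur)
--     return out
-- ===== Notes on version B (the rewrite author's own statement) =====
-- stated objective: alternative
-- what changed: B separates grouping from merging: a first pass builds an order-preserving dict mapping each key to the list of its rows, then each group is folded left-to-right with a pure merge function, instead of A's single pass that mutates one merged record per key.
import Mathlib
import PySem

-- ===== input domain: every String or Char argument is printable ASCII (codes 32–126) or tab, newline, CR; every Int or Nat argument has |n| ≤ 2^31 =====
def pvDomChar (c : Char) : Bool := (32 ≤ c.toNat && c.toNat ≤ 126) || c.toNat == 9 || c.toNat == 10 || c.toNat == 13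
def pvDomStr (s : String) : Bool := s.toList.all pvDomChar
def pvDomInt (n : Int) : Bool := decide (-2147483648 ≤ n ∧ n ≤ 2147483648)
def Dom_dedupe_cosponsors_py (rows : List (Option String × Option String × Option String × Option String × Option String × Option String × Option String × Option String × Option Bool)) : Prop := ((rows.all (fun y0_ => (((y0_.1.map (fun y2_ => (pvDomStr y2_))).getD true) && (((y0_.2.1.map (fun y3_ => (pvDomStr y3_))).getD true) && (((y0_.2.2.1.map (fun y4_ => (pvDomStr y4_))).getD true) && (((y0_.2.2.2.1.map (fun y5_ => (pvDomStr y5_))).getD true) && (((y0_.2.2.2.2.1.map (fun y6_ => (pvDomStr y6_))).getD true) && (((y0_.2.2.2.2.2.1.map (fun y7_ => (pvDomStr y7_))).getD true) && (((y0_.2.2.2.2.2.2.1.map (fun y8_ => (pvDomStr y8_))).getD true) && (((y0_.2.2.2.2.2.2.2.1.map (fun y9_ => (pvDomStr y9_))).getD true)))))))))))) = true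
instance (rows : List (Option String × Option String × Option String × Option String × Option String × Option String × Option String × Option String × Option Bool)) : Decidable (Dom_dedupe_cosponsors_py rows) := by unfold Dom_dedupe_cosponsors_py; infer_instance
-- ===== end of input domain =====

-- B separates grouping from merging (group rows per key first, then fold each group);
-- same asymptotic cost, alternative decomposition. Return-value equivalence only.

abbrev PvRow := Option String × Option String × Option String × Option String ×
  Option String × Option String × Option String × Option String × Option Bool
abbrev PvKey := Option String × Option String × Option String × Option String

-- Python truthiness of an optional string: None and "" are falsy (shared semantics helper)
def pvTruthy : Option String → Bool
  | none => false
  | some s => !(s == "")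

-- ===== PORT A =====
-- the body of A's for-loop (one dict update per row)
def pvStepA (merged : PySem.Dict PvKey PvRow) (r : PvRow) : PySem.Dict PvKey PvRow :=
  match r with
  | (c, t, n, bio, fulln, party, state, joined, is_orig) =>
    let key : PvKey := (c, t, n, bio)
    if merged.contains key = false then
      merged.insert key (c, t, n, bio, fulln, party, state, joined, is_orig)
    else
      -- merged[key]: the key is present (contains), so the getD default is never used
      match merged.getD key (c, t, n, bio, fulln, party, state, joined, is_orig) with
      | (c0, t0, n0, b0, f0, p0, s0, j0, o0) =>
        merged.insert key (c0, t0, n0, b0,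
          (if pvTruthy fulln then fulln else f0),
          (if pvTruthy party then party else p0),
          (if pvTruthy state then state else s0),
          (if pvTruthy joined then joined else j0),
          (if is_orig == some true || o0 == some true then some true
           else if is_orig != none then is_orig else o0))

def dedupe_cosponsors_py (rows : List (Option String × Option String × Option String × Option String × Option String × Option String × Option String × Option String × Option Bool)) : List (Option String × Option String × Option String × Option String × Option String × Option String × Option String × Option String × Option Bool) :=
  (rows.foldl pvStepA PySem.Dict.empty).values

-- ===== PORT B =====
-- Source B's _merge: merge one later row into the accumulated row
def pvMerge : PvRow → PvRow → PvRow
  | (c, t, n, bio, f, p, s, j, o), (_, _, _, _, f2, p2, s2, j2, o2) =>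
    (c, t, n, bio,
     (if pvTruthy f2 then f2 else f),
     (if pvTruthy p2 then p2 else p),
     (if pvTruthy s2 then s2 else s),
     (if pvTruthy j2 then j2 else j),
     (if o2 == some true || o == some true then some true
      else if o2 != none then o2 else o))

-- Source B's inner loop: cur = members[0]; for row in members[1:]: cur = _merge(cur, row)
-- ([] is unreachable: every group list is nonempty)
def pvFoldGroup : List PvRow → PvRow
  | [] => (none, none, none, none, none, none, none, none, none)
  | m0 :: rest => rest.foldl pvMerge m0

-- Source B's first loop body: groups.setdefault(key, []).append(row)
def pvStepB (g : PySem.Dict PvKey (List PvRow)) (r : PvRow) : PySem.Dict PvKey (List PvRow) :=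
  g.modify (r.1, r.2.1, r.2.2.1, r.2.2.2.1) [] (fun l => l ++ [r])

def dedupe_cosponsors_py_alt (rows : List (Option String × Option String × Option String × Option String × Option String × Option String × Option String × Option String × Option Bool)) : List (Option String × Option String × Option String × Option String × Option String × Option String × Option String × Option String × Option Bool) :=
  ((rows.foldl pvStepB PySem.Dict.empty).values).map pvFoldGroup

-- ===== PRECONDITION & SPEC =====
-- decidable equality for the row type, built stagewise (plain instance search exceeds its size limit on a 9-tuple)
def pvDecEq8 : DecidableEq (Option String × Option Bool) := inferInstance
def pvDecEq7 : DecidableEq (Option String × Option String × Option Bool) := fun a b => @instDecidableEqProd _ _ _ pvDecEq8 a b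
def pvDecEq6 : DecidableEq (Option String × Option String × Option String × Option Bool) := fun a b => @instDecidableEqProd _ _ _ pvDecEq7 a b
def pvDecEq5 : DecidableEq (Option String × Option String × Option String × Option String × Option Bool) := fun a b => @instDecidableEqProd _ _ _ pvDecEq6 a b
def pvDecEq4 : DecidableEq (Option String × Option String × Option String × Option String × Option String × Option Bool) := fun a b => @instDecidableEqProd _ _ _ pvDecEq5 a b
def pvDecEq3 : DecidableEq (Option String × Option String × Option String × Option String × Option String × Option String × Option Bool) := fun a b => @instDecidableEqProd _ _ _ pvDecEq4 a b
def pvDecEq2 : DecidableEq (Option String × Option String × Option String × Option String × Option String × Option String × Option String × Option Bool) := fun a b => @instDecidableEqProd _ _ _ pvDecEq3 a b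
def pvDecEqRow : DecidableEq PvRow := fun a b => @instDecidableEqProd _ _ _ pvDecEq2 a b

def Spec_dedupe_cosponsors_py (rows : List (Option String × Option String × Option String × Option String × Option String × Option String × Option String × Option String × Option Bool)) (out : List (Option String × Option String × Option String × Option String × Option String × Option String × Option String × Option String × Option Bool)) : Prop := out = dedupe_cosponsors_py_alt rows
instance (rows : List (Option String × Option String × Option String × Option String × Option String × Option String × Option String × Option String × Option Bool)) (out : List (Option String × Option String × Option String × Option String × Option String × Option String × Option String × Option String × Option Bool)) : Decidable (Spec_dedupe_cosponsors_py rows out) := by unfold Spec_dedupe_cosponsors_py; exact @instDecidableEqList _ pvDecEqRow out (dedupe_cosponsors_py_alt rows)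

-- ===== CLAIM (what is proved, stated in full; the proofs are below) =====
def Claim_equal_dedupe_cosponsors_py : Prop := ∀ (rows : List (Option String × Option String × Option String × Option String × Option String × Option String × Option String × Option String × Option Bool)), Dom_dedupe_cosponsors_py rows → Spec_dedupe_cosponsors_py rows (dedupe_cosponsors_py rows)

-- ===== LEMMAS AND PROOFS =====

def pvKeyOf (r : PvRow) : PvKey := (r.1, r.2.1, r.2.2.1, r.2.2.2.1)

def pvF (p : PvKey × List PvRow) : PvKey × PvRow := (p.1, pvFoldGroup p.2)

theorem pvFoldGroup_append (l : List PvRow) (r : PvRow) (h : l ≠ []) :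
    pvFoldGroup (l ++ [r]) = pvMerge (pvFoldGroup l) r := by
  cases l with
  | nil => exact absurd rfl h
  | cons m0 rest => simp [pvFoldGroup, List.foldl_append]

theorem pvStepA_eq (d : PySem.Dict PvKey PvRow) (r : PvRow) :
    pvStepA d r =
      if d.contains (pvKeyOf r) = false then d.insert (pvKeyOf r) r
      else d.insert (pvKeyOf r) (pvMerge (d.getD (pvKeyOf r) r) r) := by
  obtain ⟨c, t, n, bio, f, p, s, j, o⟩ := r
  simp only [pvStepA, pvKeyOf]
  by_cases hc : d.contains (c, t, n, bio) = false
  · simp [hc]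
  · simp only [hc]
    obtain ⟨c0, t0, n0, b0, f0, p0, s0, j0, o0⟩ := d.getD (c, t, n, bio) (c, t, n, bio, f, p, s, j, o)
    simp [pvMerge]

theorem pvStepB_eq (g : PySem.Dict PvKey (List PvRow)) (r : PvRow) :
    pvStepB g r = g.insert (pvKeyOf r) (g.getD (pvKeyOf r) [] ++ [r]) := rfl

theorem pv_main (rows : List PvRow) (d : PySem.Dict PvKey PvRow) (g : PySem.Dict PvKey (List PvRow))
    (hnd : g.keys.Nodup)
    (hne : ∀ p ∈ g.items, p.2 ≠ ([] : List PvRow))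
    (hI : d.items = g.items.map pvF) :
    (rows.foldl pvStepA d).items = ((rows.foldl pvStepB g).items).map pvF := by
  induction rows generalizing d g with
  | nil => simpa using hI
  | cons r rows ih =>
    have hkeys : d.keys = g.keys := by
      show d.items.map Prod.fst = g.items.map Prod.fst
      rw [hI, List.map_map]; rfl
    have hcont : d.contains (pvKeyOf r) = g.contains (pvKeyOf r) := by
      rw [PySem.Dict.contains_eq_decide_mem_keys, PySem.Dict.contains_eq_decide_mem_keys, hkeys]
    have hndd : d.keys.Nodup := hkeys ▸ hnd
    simp only [List.foldl_cons]
    by_cases hc : g.contains (pvKeyOf r) = true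
    · -- existing key: both sides overwrite in place
      have hcd : d.contains (pvKeyOf r) = true := hcont.trans hc
      have hA : pvStepA d r = d.insert (pvKeyOf r) (pvMerge (d.getD (pvKeyOf r) r) r) := by
        rw [pvStepA_eq]; simp [hcd]
      rw [hA, pvStepB_eq]
      apply ih
      · exact PySem.Dict.nodup_keys_insert _ _ _ hnd
      · intro p hp
        rcases (PySem.Dict.mem_items_insert _ _ _ p).1 hp with h | h
        · subst h; simp
        · exact hne p h.1
      · rw [PySem.Dict.items_insert_of_contains _ _ hc,
            PySem.Dict.items_insert_of_contains _ _ hcd, hI, List.map_map, List.map_map]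
        apply List.map_congr_left
        intro p hp
        by_cases hpk : p.1 = pvKeyOf r
        · have hpg : (pvKeyOf r, p.2) ∈ g.items := by rw [← hpk]; exact hp
          have hgetg : g.getD (pvKeyOf r) [] = p.2 :=
            PySem.Dict.getD_of_mem_items _ hpg hnd []
          have hpd : (pvKeyOf r, pvFoldGroup p.2) ∈ d.items := by
            rw [hI]
            have hFp : pvF p = (pvKeyOf r, pvFoldGroup p.2) := by rw [pvF, hpk]
            rw [← hFp]
            exact List.mem_map_of_mem hp
          have hgetd : d.getD (pvKeyOf r) r = pvFoldGroup p.2 :=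
            PySem.Dict.getD_of_mem_items _ hpd hndd r
          simp only [Function.comp_apply, pvF, hpk]
          simp only [beq_self_eq_true, if_true, hgetd, hgetg]
          rw [pvFoldGroup_append _ _ (hne p hp)]
        · have hbeq : (p.1 == pvKeyOf r) = false := by simp [hpk]
          simp only [Function.comp_apply, pvF, hbeq]
          simp
    · -- fresh key: both sides append
      have hgc : g.contains (pvKeyOf r) = false := by
        cases h : g.contains (pvKeyOf r) with
        | true => exact absurd h hc
        | false => rfl
      have hcd : d.contains (pvKeyOf r) = false := hcont.trans hgc
      have hA : pvStepA d r = d.insert (pvKeyOf r) r := by rw [pvStepA_eq]; simp [hcd]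
      rw [hA, pvStepB_eq]
      apply ih
      · exact PySem.Dict.nodup_keys_insert _ _ _ hnd
      · intro p hp
        rcases (PySem.Dict.mem_items_insert _ _ _ p).1 hp with h | h
        · subst h; simp
        · exact hne p h.1
      · rw [PySem.Dict.items_insert_of_not_contains _ _ hgc,
            PySem.Dict.items_insert_of_not_contains _ _ hcd,
            PySem.Dict.getD_of_not_contains _ _ hgc, hI, List.map_append]
        simp [pvF, pvFoldGroup]

-- ===== VERDICT (by name: the statement is the Claim_ definition above) =====
theorem dedupe_cosponsors_py_spec : Claim_equal_dedupe_cosponsors_py := by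
  intro rows _
  show dedupe_cosponsors_py rows = dedupe_cosponsors_py_alt rows
  unfold dedupe_cosponsors_py dedupe_cosponsors_py_alt
  have h := pv_main rows PySem.Dict.empty PySem.Dict.empty (by simp [PySem.Dict.empty])
    (by intro p hp; simp [PySem.Dict.empty] at hp) (by simp [PySem.Dict.empty])
  show (rows.foldl pvStepA PySem.Dict.empty).items.map Prod.snd =
    ((rows.foldl pvStepB PySem.Dict.empty).items.map Prod.snd).map pvFoldGroup
  rw [h, List.map_map, List.map_map]
  rfl
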